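-- pv_equiv track=rewrite | github.com/67237/New_Bot | News_Boot.py | check_keywords_in_paragraph
-- ===== SOURCE A (Python) =====
-- import string
--
-- def check_keywords_in_paragraph(keywords, paragraph):
--     translator = str.maketrans('', '', string.punctuation)
--     paragraph_words = paragraph.lower().translate(translator).split()
--     keywords_lower = [word.lower() for word in keywords]
--     matched_keywords = set(paragraph_words) & set(keywords_lower)
--
--     if len(matched_keywords) >= 3:
--         return 1
--     else:
--         return 0
-- ===== SOURCE B (Python) =====
-- import string
--
--
-- def check_keywords_in_paragraph(keywords, paragraph):
--     # Sort the deduplicated word lists and count common elements with a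
--     # two-pointer merge, instead of hashing one set against the other.
--     translator = str.maketrans('', '', string.punctuation)
--     pw = sorted(set(paragraph.lower().translate(translator).split()))
--     kw = sorted(set(word.lower() for word in keywords))
--     i = j = count = 0
--     while i < len(pw) and j < len(kw):
--         if pw[i] == kw[j]:
--             count += 1
--             i += 1
--             j += 1
--         elif pw[i] < kw[j]:
--             i += 1
--         else:
--             j += 1
--     return 1 if count >= 3 else 0
-- ===== Notes on version B (the rewrite author's own statement) =====
-- stated objective: alternative
-- what changed: B sorts the deduplicated paragraph words and the deduplicated lowercased keywords and counts the common elements with a two-pointer merge over the two sorted lists, instead of materializing two hash sets and intersecting them.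
import Mathlib
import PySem

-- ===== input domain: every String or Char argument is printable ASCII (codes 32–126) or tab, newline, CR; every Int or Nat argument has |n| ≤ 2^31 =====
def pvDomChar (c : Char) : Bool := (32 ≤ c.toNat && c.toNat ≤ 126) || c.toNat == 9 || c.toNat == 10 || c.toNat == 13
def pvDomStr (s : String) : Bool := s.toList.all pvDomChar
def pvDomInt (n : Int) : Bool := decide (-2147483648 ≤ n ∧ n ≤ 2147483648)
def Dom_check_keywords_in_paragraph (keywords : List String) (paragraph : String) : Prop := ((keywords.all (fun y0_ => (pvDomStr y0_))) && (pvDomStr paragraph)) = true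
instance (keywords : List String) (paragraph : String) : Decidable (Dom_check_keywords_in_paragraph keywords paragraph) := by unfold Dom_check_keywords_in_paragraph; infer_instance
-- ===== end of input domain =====

-- B replaces A's hash-set intersection by sorting the two deduplicated word lists and
-- counting common elements with a two-pointer merge (objective: alternative).

-- ===== PORT A =====

-- string.punctuation = the 32 ASCII characters !"#$%&'()*+,-./:;<=>?@[\]^_`{|}~ (codes 33–47, 58–64, 91–96, 123–126); exact.
def pvIsPunct (c : Char) : Bool :=
  (33 ≤ c.toNat && c.toNat ≤ 47) || (58 ≤ c.toNat && c.toNat ≤ 64) ||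
  (91 ≤ c.toNat && c.toNat ≤ 96) || (123 ≤ c.toNat && c.toNat ≤ 126)

-- s.translate(str.maketrans('', '', string.punctuation)): delete exactly those characters; exact.
def pvTranslateOut (s : String) : String := String.ofList (s.toList.filter (fun c => !pvIsPunct c))

def check_keywords_in_paragraph (keywords : List String) (paragraph : String) : Int :=
  let paragraph_words := PySem.Str.split₀ (pvTranslateOut (PySem.Str.lower paragraph))
  let keywords_lower := keywords.map (fun word => PySem.Str.lower word)
  let matched_keywords :=
    PySem.Set.inter (PySem.Set.ofList paragraph_words) (PySem.Set.ofList keywords_lower)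
  if 3 ≤ PySem.Set.len matched_keywords then 1 else 0

-- ===== PORT B =====

-- the while-loop over indices i, j: a two-pointer merge counting common elements of two lists;
-- Python's '<' on strings is code-point lexicographic = Lean's String '<'.
def pvMergeCount : List String → List String → Nat
  | [], _ => 0
  | _ :: _, [] => 0
  | a :: as, b :: bs =>
    if a = b then pvMergeCount as bs + 1
    else if a < b then pvMergeCount as (b :: bs)
    else pvMergeCount (a :: as) bs
  termination_by l1 l2 => l1.length + l2.length
  decreasing_by all_goals simp <;> omega

def check_keywords_in_paragraph_alt (keywords : List String) (paragraph : String) : Int :=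
  -- sorted(set(...)): dedup then sort (no key)
  let pw := PySem.List.sorted
    (PySem.Set.ofList (PySem.Str.split₀ (pvTranslateOut (PySem.Str.lower paragraph))))
    (fun x => x) false
  let kw := PySem.List.sorted
    (PySem.Set.ofList (keywords.map (fun word => PySem.Str.lower word)))
    (fun x => x) false
  if 3 ≤ pvMergeCount pw kw then 1 else 0

-- ===== PRECONDITION & SPEC =====
def Spec_check_keywords_in_paragraph (keywords : List String) (paragraph : String) (out : Int) : Prop := out = check_keywords_in_paragraph_alt keywords paragraph
instance (keywords : List String) (paragraph : String) (out : Int) : Decidable (Spec_check_keywords_in_paragraph keywords paragraph out) := by unfold Spec_check_keywords_in_paragraph; infer_instance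

-- ===== CLAIM (what is proved, stated in full; the proofs are below) =====
def Claim_equal_check_keywords_in_paragraph : Prop := ∀ (keywords : List String) (paragraph : String), Dom_check_keywords_in_paragraph keywords paragraph → Spec_check_keywords_in_paragraph keywords paragraph (check_keywords_in_paragraph keywords paragraph)

-- ===== LEMMAS AND PROOFS =====

-- on strictly increasing lists, the two-pointer merge counts exactly the common elements
theorem pv_mergeCount_eq (l1 l2 : List String)
    (h1 : l1.Pairwise (· < ·)) (h2 : l2.Pairwise (· < ·)) :
    pvMergeCount l1 l2 = (l1.filter (fun x => l2.contains x)).length := by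
  fun_induction pvMergeCount l1 l2 with
  | case1 l2 => simp
  | case2 a as => simp
  | case3 as b bs ih =>
      have h1' := (List.pairwise_cons.mp h1).2
      have h2' := (List.pairwise_cons.mp h2).2
      have key : as.filter (fun x => (b :: bs).contains x) = as.filter (fun x => bs.contains x) := by
        apply List.filter_congr
        intro x hx
        have hne : x ≠ b := ne_of_gt ((List.pairwise_cons.mp h1).1 x hx)
        simp [hne]
      have hhd : List.filter (fun x => (b :: bs).contains x) (b :: as) =
          b :: List.filter (fun x => (b :: bs).contains x) as :=
        List.filter_cons_of_pos (by simp)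
      rw [hhd, key, List.length_cons, ih h1' h2']
  | case4 a as b bs hne hlt ih =>
      have h1' := (List.pairwise_cons.mp h1).2
      have hnm : a ∉ b :: bs := by
        intro hm
        rcases List.mem_cons.mp hm with h | h
        · exact hne h
        · exact absurd hlt (not_lt.mpr ((List.pairwise_cons.mp h2).1 a h).le)
      have key : ((a :: as).filter (fun x => (b :: bs).contains x)) =
          as.filter (fun x => (b :: bs).contains x) :=
        List.filter_cons_of_neg (by simpa using hnm)
      rw [key, ih h1' h2]
  | case5 a as b bs hne hnlt ih =>
      have h2' := (List.pairwise_cons.mp h2).2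
      have hba : b < a := lt_of_le_of_ne (not_lt.mp hnlt) (fun h => hne h.symm)
      have key : (a :: as).filter (fun x => (b :: bs).contains x) =
          (a :: as).filter (fun x => bs.contains x) := by
        apply List.filter_congr
        intro x hx
        have hbx : b < x := by
          rcases List.mem_cons.mp hx with h | h
          · exact h ▸ hba
          · exact lt_trans hba ((List.pairwise_cons.mp h1).1 x h)
        have hxb : x ≠ b := ne_of_gt hbx
        simp [hxb]
      rw [key, ih h1 h2']

-- A's intersection size equals B's merge count over the sorted deduplicated lists
theorem pv_len_inter_eq_mergeCount (pw kwl : List String) :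
    PySem.Set.len (PySem.Set.inter (PySem.Set.ofList pw) (PySem.Set.ofList kwl)) =
      pvMergeCount
        (PySem.List.sorted (PySem.Set.ofList pw) (fun x => x) false)
        (PySem.List.sorted (PySem.Set.ofList kwl) (fun x => x) false) := by
  rw [pv_mergeCount_eq _ _ (PySem.List.sorted_ofList_pairwise_lt pw)
    (PySem.List.sorted_ofList_pairwise_lt kwl)]
  have hpred : ∀ x : String,
      (PySem.List.sorted (PySem.Set.ofList kwl) (fun x => x) false).contains x =
        (PySem.Set.ofList kwl).contains x := by
    intro x
    simp [PySem.List.mem_sorted]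
  have hfun : (fun x => (PySem.List.sorted (PySem.Set.ofList kwl) (fun x => x) false).contains x) =
      (fun x => (PySem.Set.ofList kwl).contains x) := funext hpred
  rw [hfun]
  have hperm : (PySem.List.sorted (PySem.Set.ofList pw) (fun x => x) false).Perm
      (PySem.Set.ofList pw) := PySem.List.sorted_perm _ _ _
  have := (hperm.filter (fun x => (PySem.Set.ofList kwl).contains x)).length_eq
  rw [this]
  rfl

-- ===== VERDICT (by name: the statement is the Claim_ definition above) =====
theorem check_keywords_in_paragraph_spec : Claim_equal_check_keywords_in_paragraph := by
  intro keywords paragraph _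
  show check_keywords_in_paragraph keywords paragraph = check_keywords_in_paragraph_alt keywords paragraph
  simp only [check_keywords_in_paragraph, check_keywords_in_paragraph_alt,
    pv_len_inter_eq_mergeCount]
  split_ifs with ha hb <;> omega
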